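-- pv_equiv track=rewrite | github.com/kyriakosar/Shakespeare-AI-generator | preprocessing.py | deleteSymbols
-- ===== SOURCE A (Python) =====
-- def deleteSymbols(lines):
--     new_lines = []
--     for tmp in lines:
--         if '"' in tmp:
--             tmp = tmp.replace('"','')
--         if ',' in tmp:
--             tmp = tmp.replace(',','')
--         if '?' in tmp:
--             tmp = tmp.replace('?','')
--         if ';' in tmp:
--             tmp = tmp.replace(';','')
--         if '!' in tmp:
--             tmp = tmp.replace('!','')
--         if '.' in tmp:
--             tmp = tmp.replace('.','')
--         if ':' in tmp:
--             tmp = tmp.replace(':','')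
--         new_lines.append(tmp)
--     return new_lines
-- ===== SOURCE B (Python) =====
-- REMOVE = {'"', ',', '?', ';', '!', '.', ':'}
--
-- def deleteSymbols(lines):
--     return [''.join(c for c in line if c not in REMOVE) for line in lines]
-- ===== Notes on version B (the rewrite author's own statement) =====
-- stated objective: simpler
-- what changed: Replaces seven guarded str.replace passes per line with one membership-filtered traversal of each line's characters, joined once.
import Mathlib
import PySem

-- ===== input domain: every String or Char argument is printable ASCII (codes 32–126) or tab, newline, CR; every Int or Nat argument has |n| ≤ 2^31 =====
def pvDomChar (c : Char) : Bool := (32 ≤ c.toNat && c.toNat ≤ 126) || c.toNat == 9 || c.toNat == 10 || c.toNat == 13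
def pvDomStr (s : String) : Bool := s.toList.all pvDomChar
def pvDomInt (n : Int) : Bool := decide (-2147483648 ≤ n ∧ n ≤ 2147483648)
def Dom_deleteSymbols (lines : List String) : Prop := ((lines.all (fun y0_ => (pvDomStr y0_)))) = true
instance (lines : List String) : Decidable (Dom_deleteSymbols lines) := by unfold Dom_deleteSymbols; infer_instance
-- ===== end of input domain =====

-- B: one membership-filtered character pass per line instead of A's seven guarded replace passes (simpler).


-- ===== PORT A =====
-- one line of A's loop body: the seven 'if sym in tmp: tmp = tmp.replace(sym, "")' passes in order
def deleteSymbolsStep (tmp0 : String) : String :=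
  let tmp1 := if PySem.Str.isIn "\"" tmp0 then PySem.Str.replace tmp0 "\"" "" else tmp0
  let tmp2 := if PySem.Str.isIn "," tmp1 then PySem.Str.replace tmp1 "," "" else tmp1
  let tmp3 := if PySem.Str.isIn "?" tmp2 then PySem.Str.replace tmp2 "?" "" else tmp2
  let tmp4 := if PySem.Str.isIn ";" tmp3 then PySem.Str.replace tmp3 ";" "" else tmp3
  let tmp5 := if PySem.Str.isIn "!" tmp4 then PySem.Str.replace tmp4 "!" "" else tmp4
  let tmp6 := if PySem.Str.isIn "." tmp5 then PySem.Str.replace tmp5 "." "" else tmp5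
  let tmp7 := if PySem.Str.isIn ":" tmp6 then PySem.Str.replace tmp6 ":" "" else tmp6
  tmp7

def deleteSymbols (lines : List String) : List String :=
  lines.foldl (fun new_lines tmp => new_lines ++ [deleteSymbolsStep tmp]) []

-- ===== PORT B =====
-- the removal set REMOVE = {'"', ',', '?', ';', '!', '.', ':'}
def pvRemoveSet : List Char := ['"', ',', '?', ';', '!', '.', ':']

-- ''.join(c for c in line if c not in REMOVE), per line
def deleteSymbols_alt (lines : List String) : List String :=
  lines.map (fun line => String.ofList (line.toList.filter (fun c => !pvRemoveSet.contains c)))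

-- ===== PRECONDITION & SPEC =====
def Spec_deleteSymbols (lines : List String) (out : List String) : Prop := out = deleteSymbols_alt lines
instance (lines : List String) (out : List String) : Decidable (Spec_deleteSymbols lines out) := by unfold Spec_deleteSymbols; infer_instance

-- ===== CLAIM (what is proved, stated in full; the proofs are below) =====
def Claim_equal_deleteSymbols : Prop := ∀ (lines : List String), Dom_deleteSymbols lines → Spec_deleteSymbols lines (deleteSymbols lines)

-- ===== LEMMAS AND PROOFS =====

-- replace.go with a single-char pattern and empty replacement is a filter (fuel suffices)
theorem replace_go_single (c : Char) :
    ∀ (l acc : List Char) (fuel : Nat), l.length ≤ fuel →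
      PySem.Chars.replace.go [c] [] fuel l acc = acc.reverse ++ l.filter (fun x => x != c) := by
  intro l
  induction l with
  | nil =>
      intro acc fuel _
      cases fuel <;> simp [PySem.Chars.replace.go]
  | cons hd tl ih =>
      intro acc fuel hlen
      cases fuel with
      | zero => simp at hlen
      | succ n =>
        simp only [List.length_cons, Nat.succ_le_succ_iff] at hlen
        by_cases h : hd = c
        · subst h
          rw [PySem.Chars.replace.go]
          simp [List.isPrefixOf, ih _ n hlen]
        · rw [PySem.Chars.replace.go,
            if_neg (by simp [List.isPrefixOf]; exact fun he => h he.symm),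
            ih _ n hlen]
          simp [h]

theorem replace_single (c : Char) (s : List Char) :
    PySem.Chars.replace s [c] [] = s.filter (fun x => x != c) := by
  rw [PySem.Chars.replace]
  simp [replace_go_single c s [] s.length le_rfl]

-- one guarded pass of A equals an unconditional character filter
theorem step_one (c : Char) (w : String) (hw : w.toList = [c]) (s : String) :
    (if PySem.Str.isIn w s then PySem.Str.replace s w "" else s).toList
      = s.toList.filter (fun x => x != c) := by
  by_cases h : PySem.Str.isIn w s = true
  · simp only [h, if_true]
    rw [show (PySem.Str.replace s w "").toList = PySem.Chars.replace s.toList [c] [] from by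
      simp [PySem.Str.replace, hw]]
    exact replace_single c s.toList
  · simp only [h, if_false, Bool.false_eq_true]
    have hmem : c ∉ s.toList := by
      intro hc
      apply h
      rw [PySem.Str.isIn_iff_infix, hw]
      obtain ⟨u, v, h'⟩ := List.append_of_mem hc
      rw [h']
      exact ⟨u, v, by simp⟩
    rw [List.filter_eq_self.mpr]
    intro a ha
    simp only [bne_iff_ne, ne_eq]
    intro he; exact hmem (he ▸ ha)

-- the whole loop body equals B's single filter on the characters
theorem step_eq (tmp : String) :
    deleteSymbolsStep tmp
      = String.ofList (tmp.toList.filter (fun c => !pvRemoveSet.contains c)) := by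
  apply String.toList_inj.mp
  simp only [deleteSymbolsStep]
  rw [step_one ':' ":" (by decide), step_one '.' "." (by decide), step_one '!' "!" (by decide),
      step_one ';' ";" (by decide), step_one '?' "?" (by decide), step_one ',' "," (by decide),
      step_one '"' "\"" (by decide), String.toList_ofList]
  simp only [List.filter_filter]
  refine List.filter_congr ?_
  intro x _
  simp only [pvRemoveSet, List.contains_cons, List.contains_nil, Bool.or_false, Bool.not_or,
    bne]
  ac_rfl

-- appending in a foldl builds the map
theorem foldl_append_map (f : String → String) (l : List String) :
    ∀ acc : List String, l.foldl (fun ns tmp => ns ++ [f tmp]) acc = acc ++ l.map f := by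
  induction l with
  | nil => intro acc; simp
  | cons h t ih => intro acc; simp [ih]

-- ===== VERDICT (by name: the statement is the Claim_ definition above) =====
theorem deleteSymbols_spec : Claim_equal_deleteSymbols := by
  intro lines _
  unfold Spec_deleteSymbols deleteSymbols deleteSymbols_alt
  rw [foldl_append_map]
  simp only [List.nil_append]
  apply List.map_congr_left
  intro s _
  exact step_eq s
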